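-- pv_equiv track=rewrite | github.com/Jacob-Gubernat/LibGub | search.py | get_newest
-- ===== SOURCE A (Python) =====
-- def get_newest(books):
--     best = None
--     max_year = -1
--
--     for b in books:
--         year_str = (b.get("Year") or "").strip()
--         if year_str.isdigit():
--             yr = int(year_str)
--         else:
--             yr = -1
--
--         if best is None or yr > max_year:
--             best = b
--             max_year = yr
--
--     return best
-- ===== SOURCE B (Python) =====
-- def _year(b):
--     s = (b.get("Year") or "").strip()
--     return int(s) if s.isdigit() else -1
--
--
-- def get_newest(books):
--     keys = [_year(b) for b in books]
--     if not keys: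
--         return None
--     m = max(keys)
--     return books[keys.index(m)]
-- ===== Notes on version B (the rewrite author's own statement) =====
-- stated objective: alternative
-- what changed: A's single-pass compare-and-update loop with (best, max_year) state is replaced by a two-pass decomposition: build the key list once, take max(keys), and return the book at keys.index(m) (first attaining book, matching A's first-on-tie choice).
import Mathlib
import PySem

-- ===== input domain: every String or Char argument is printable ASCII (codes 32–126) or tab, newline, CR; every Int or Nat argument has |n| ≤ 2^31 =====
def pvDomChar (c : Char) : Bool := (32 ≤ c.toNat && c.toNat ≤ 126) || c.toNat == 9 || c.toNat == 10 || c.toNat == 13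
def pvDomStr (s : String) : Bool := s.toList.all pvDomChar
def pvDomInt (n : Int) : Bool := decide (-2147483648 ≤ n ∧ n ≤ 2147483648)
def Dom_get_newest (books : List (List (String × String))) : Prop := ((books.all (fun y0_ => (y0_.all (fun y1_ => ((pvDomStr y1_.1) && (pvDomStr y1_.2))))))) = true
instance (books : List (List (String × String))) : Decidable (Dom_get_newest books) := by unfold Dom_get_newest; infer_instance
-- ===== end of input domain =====

-- B replaces A's single-pass compare-and-update loop by a two-pass form: compute the key
-- list once, take its max, and index the first book attaining it (alternative decomposition).

-- shared key helper: (b.get("Year") or "").strip(); int(s) if s.isdigit() else -1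
-- (both Pythons contain this identical parsing code; `or ""` only turns None/"" into "",
--  which `.getD ""` reproduces since strip "" = "")
def pvGetYear (b : List (String × String)) : Int :=
  let s := PySem.Str.strip (((b.find? (fun p => p.1 == "Year")).map (fun p => p.2)).getD "")
  if PySem.Str.strIsdigit s then (PySem.Int.ofStr? s).getD 0 else -1
  -- getD 0 is unreachable: on the ASCII domain, isdigit guarantees int(s) parses

-- ===== PORT A =====
def get_newest (books : List (List (String × String))) : Option (List (String × String)) :=
  (books.foldl
    (fun st b =>
      let yr := pvGetYear b
      if st.1.isNone || decide (st.2 < yr) then (some b, yr) else st)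
    ((none : Option (List (String × String))), (-1 : Int))).1

-- ===== PORT B =====
def get_newest_alt (books : List (List (String × String))) : Option (List (String × String)) :=
  let keys := books.map pvGetYear
  (PySem.List.max? keys (fun y => y)).bind (fun m =>   -- none ↔ `if not keys: return None`
    (PySem.List.index? keys m).bind (fun i =>           -- keys.index(m) (ValueError = none, unreachable: m ∈ keys)
      books[i]?))                                       -- books[i] (i a valid nonnegative index)

-- ===== PRECONDITION & SPEC =====
def Spec_get_newest (books : List (List (String × String))) (out : Option (List (String × String))) : Prop := out = get_newest_alt books
instance (books : List (List (String × String))) (out : Option (List (String × String))) : Decidable (Spec_get_newest books out) := by unfold Spec_get_newest; infer_instance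

-- ===== CLAIM (what is proved, stated in full; the proofs are below) =====
def Claim_equal_get_newest : Prop := ∀ (books : List (List (String × String))), Dom_get_newest books → Spec_get_newest books (get_newest books)



-- ===== LEMMAS AND PROOFS =====

-- proof-side tail recursion equal to A's loop once best is set
def pvPick (b : List (String × String)) (m : Int) :
    List (List (String × String)) → (List (String × String)) × Int
  | [] => (b, m)
  | x :: t => if m < pvGetYear x then pvPick x (pvGetYear x) t else pvPick b m t

theorem pv_foldl_eq_pick (t : List (List (String × String)))
    (b : List (String × String)) (m : Int) :
    t.foldl
      (fun st x =>
        let yr := pvGetYear x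
        if st.1.isNone || decide (st.2 < yr) then (some x, yr) else st)
      (some b, m)
      = (some (pvPick b m t).1, (pvPick b m t).2) := by
  induction t generalizing b m with
  | nil => simp [pvPick]
  | cons x t ih =>
      rw [List.foldl_cons]
      by_cases h : m < pvGetYear x
      · rw [if_pos (by simp [h]), pvPick, if_pos h]
        exact ih x (pvGetYear x)
      · rw [if_neg (by simp [h]), pvPick, if_neg h]
        exact ih b m

theorem pv_find?_isSome (t : List (List (String × String))) (b : List (String × String)) :
    ((b :: t).find? (fun x => pvGetYear x == (t.map pvGetYear).foldl max (pvGetYear b))).isSome := by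
  have hmem : (t.map pvGetYear).foldl max (pvGetYear b) ∈ (b :: t).map pvGetYear :=
    PySem.List.max?_mem (xs := (b :: t).map pvGetYear) (key := fun y => y)
      (by rw [List.map_cons, PySem.List.max?_id_cons])
  rcases List.mem_map.mp hmem with ⟨y, hy, hky⟩
  exact List.find?_isSome.mpr ⟨y, hy, by simp [hky]⟩

-- A's loop picks the FIRST book whose key attains the running maximum
theorem pv_pick_spec (t : List (List (String × String))) (b : List (String × String)) :
    pvPick b (pvGetYear b) t
      = (((b :: t).find? (fun x => pvGetYear x == (t.map pvGetYear).foldl max (pvGetYear b))).getD b,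
         (t.map pvGetYear).foldl max (pvGetYear b)) := by
  induction t generalizing b with
  | nil => simp [pvPick]
  | cons x t ih =>
      rw [pvPick, List.map_cons, List.foldl_cons]
      by_cases h : pvGetYear b < pvGetYear x
      · rw [if_pos h, max_eq_right h.le, ih x]
        have hxle : pvGetYear x ≤ (t.map pvGetYear).foldl max (pvGetYear x) :=
          (PySem.List.le_foldl_max (t.map pvGetYear) (pvGetYear x)).1
        have hb : (b :: x :: t).find? (fun y => pvGetYear y == (t.map pvGetYear).foldl max (pvGetYear x))
            = (x :: t).find? (fun y => pvGetYear y == (t.map pvGetYear).foldl max (pvGetYear x)) :=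
          List.find?_cons_of_neg (by simp only [beq_iff_eq]; omega)
        rw [hb]
        rcases Option.isSome_iff_exists.mp (pv_find?_isSome t x) with ⟨y, hy⟩
        simp [hy]
      · rw [if_neg h, max_eq_left (by omega), ih b]
        have hble : pvGetYear b ≤ (t.map pvGetYear).foldl max (pvGetYear b) :=
          (PySem.List.le_foldl_max (t.map pvGetYear) (pvGetYear b)).1
        by_cases hb : pvGetYear b = (t.map pvGetYear).foldl max (pvGetYear b)
        · have h1 : (b :: t).find? (fun y => pvGetYear y == (t.map pvGetYear).foldl max (pvGetYear b))
              = some b := List.find?_cons_of_pos (by simp only [beq_iff_eq]; exact hb)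
          have h2 : (b :: x :: t).find? (fun y => pvGetYear y == (t.map pvGetYear).foldl max (pvGetYear b))
              = some b := List.find?_cons_of_pos (by simp only [beq_iff_eq]; exact hb)
          rw [h1, h2]
        · have h1 : (b :: t).find? (fun y => pvGetYear y == (t.map pvGetYear).foldl max (pvGetYear b))
              = t.find? (fun y => pvGetYear y == (t.map pvGetYear).foldl max (pvGetYear b)) :=
            List.find?_cons_of_neg (by simp only [beq_iff_eq]; omega)
          have h2 : (b :: x :: t).find? (fun y => pvGetYear y == (t.map pvGetYear).foldl max (pvGetYear b))
              = (x :: t).find? (fun y => pvGetYear y == (t.map pvGetYear).foldl max (pvGetYear b)) :=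
            List.find?_cons_of_neg (by simp only [beq_iff_eq]; omega)
          have h3 : (x :: t).find? (fun y => pvGetYear y == (t.map pvGetYear).foldl max (pvGetYear b))
              = t.find? (fun y => pvGetYear y == (t.map pvGetYear).foldl max (pvGetYear b)) :=
            List.find?_cons_of_neg (by simp only [beq_iff_eq]; omega)
          rw [h1, h2, h3]

-- indexing the original list at the position of a key in the mapped list is find?-by-key
theorem pv_index_map (l : List (List (String × String))) (M : Int) :
    (PySem.List.index? (l.map pvGetYear) M).bind (fun i => l[i]?)
      = l.find? (fun x => pvGetYear x == M) := by
  induction l with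
  | nil => simp [PySem.List.index?]
  | cons x t ih =>
      by_cases h : pvGetYear x = M
      · rw [show PySem.List.index? ((x :: t).map pvGetYear) M = some 0 from by
          simp [PySem.List.index?_eq_idxOf?, List.idxOf?, List.findIdx?_cons, h]]
        simp [h]
      · rw [show ((x :: t).map pvGetYear) = pvGetYear x :: t.map pvGetYear from List.map_cons .. ,
            PySem.List.index?_cons_of_ne (x := pvGetYear x) (v := M) (xs := t.map pvGetYear) h,
            List.find?_cons_of_neg (by simp [h]), ← ih]
        cases PySem.List.index? (t.map pvGetYear) M with
        | none => simp
        | some i => simp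

-- ===== VERDICT (by name: the statement is the Claim_ definition above) =====
theorem get_newest_spec : Claim_equal_get_newest := by
  intro books _
  unfold Spec_get_newest
  cases books with
  | nil => rfl
  | cons b t =>
      unfold get_newest
      rw [List.foldl_cons, if_pos (by simp), pv_foldl_eq_pick, pv_pick_spec]
      simp only [get_newest_alt, List.map_cons]
      rw [PySem.List.max?_id_cons, Option.bind_some]
      have hidx := pv_index_map (b :: t) ((t.map pvGetYear).foldl max (pvGetYear b))
      simp only [List.map_cons] at hidx
      rw [hidx]
      rcases Option.isSome_iff_exists.mp (pv_find?_isSome t b) with ⟨y, hy⟩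
      simp [hy]
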